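-- pv_equiv track=rewrite | github.com/nguyen-ngocduong/Python | CON6-RECURSIVE/Bai18.py | check
-- ===== SOURCE A (Python) =====
-- def check(a, left, right):
--     if left >= right:
--         return True
--     else:
--         if a[left] != a[right]:
--             return False
--         else :
--             return check(a, left+1, right - 1)
-- ===== SOURCE B (Python) =====
-- def check(a, left, right):
--     m = (right - left + 1) // 2
--     for k in range(m):
--         if a[left + k] != a[right - k]:
--             return False
--     return True
-- ===== Notes on version B (the rewrite author's own statement) =====
-- stated objective: idiomatic
-- what changed: Replaces the tail recursion by a single counted loop over the half-window: the number of comparisons ceil((right-left)/2) is computed up front and the loop checks a[left+k] against a[right-k], removing the recursive calls and the shrinking index pair.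
import Mathlib
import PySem

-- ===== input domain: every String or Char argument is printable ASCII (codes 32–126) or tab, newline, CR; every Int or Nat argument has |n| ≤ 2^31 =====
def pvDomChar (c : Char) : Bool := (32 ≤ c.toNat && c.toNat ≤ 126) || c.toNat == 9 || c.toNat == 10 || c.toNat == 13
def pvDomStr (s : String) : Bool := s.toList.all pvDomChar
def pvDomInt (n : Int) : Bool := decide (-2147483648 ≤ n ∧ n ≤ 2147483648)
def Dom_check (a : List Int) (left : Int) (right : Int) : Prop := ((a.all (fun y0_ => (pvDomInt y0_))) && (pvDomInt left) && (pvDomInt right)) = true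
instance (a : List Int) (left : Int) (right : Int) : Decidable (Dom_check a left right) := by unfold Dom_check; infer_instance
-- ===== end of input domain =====

-- B replaces the tail recursion by a counted loop over the half-window (same comparisons, no recursion).

-- ===== PORT A =====
def check (a : List Int) (left : Int) (right : Int) : Bool :=
  if left ≥ right then true
  else
    if PySem.List.pyGet? a left != PySem.List.pyGet? a right then false
    else check a (left + 1) (right - 1)
termination_by (right - left).toNat
decreasing_by simp at *; omega

-- ===== PORT B =====
def check_alt (a : List Int) (left : Int) (right : Int) : Bool :=
  let m := PySem.Int.floordiv (right - left + 1) 2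
  (PySem.List.pyRange 0 m 1).all (fun k =>
    PySem.List.pyGet? a (left + k) == PySem.List.pyGet? a (right - k))

-- ===== PRECONDITION & SPEC =====
-- Pre_ excludes exactly the calls on which the Python raises IndexError: a non-trivial
-- window (left < right) whose first access a[left] or a[right] is already out of range.
def Pre_check (a : List Int) (left : Int) (right : Int) : Prop :=
  left < right → (-(a.length : Int) ≤ left ∧ right < (a.length : Int))
instance (a : List Int) (left : Int) (right : Int) : Decidable (Pre_check a left right) := by unfold Pre_check; infer_instance
def pvWitness_check : List Int × Int × Int := ([1, 2, 1], 0, 2)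
def Spec_check (a : List Int) (left : Int) (right : Int) (out : Bool) : Prop := out = check_alt a left right
instance (a : List Int) (left : Int) (right : Int) (out : Bool) : Decidable (Spec_check a left right out) := by unfold Spec_check; infer_instance

-- ===== CLAIM (what is proved, stated in full; the proofs are below) =====
def Claim_equal_check : Prop := ∀ (a : List Int) (left : Int) (right : Int), Dom_check a left right → Pre_check a left right → Spec_check a left right (check a left right)

-- ===== LEMMAS AND PROOFS =====

lemma fd2_nonpos {x : Int} (h : x ≤ 1) : PySem.Int.floordiv x 2 ≤ 0 := by
  rw [PySem.Int.floordiv_eq_ediv_of_pos (by omega)]; omega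

lemma fd2_pos {x : Int} (h : 2 ≤ x) : 0 < PySem.Int.floordiv x 2 := by
  rw [PySem.Int.floordiv_eq_ediv_of_pos (by omega)]; omega

lemma fd2_step (x : Int) : PySem.Int.floordiv (x - 2) 2 = PySem.Int.floordiv x 2 - 1 := by
  rw [PySem.Int.floordiv_eq_ediv_of_pos (by omega), PySem.Int.floordiv_eq_ediv_of_pos (by omega)]
  omega

lemma check_alt_of_ge (a : List Int) (l r : Int) (h : r ≤ l) : check_alt a l r = true := by
  have hm : ((PySem.Int.floordiv (r - l + 1) 2) - 0).toNat = 0 := by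
    have := fd2_nonpos (x := r - l + 1) (by omega); omega
  simp only [check_alt, PySem.List.pyRange_one, hm, List.range_zero, List.map_nil, List.all_nil]

lemma all_pyRange_shift (m : Int) (q : Int → Bool) :
    (PySem.List.pyRange 1 m 1).all q = (PySem.List.pyRange 0 (m - 1) 1).all (fun k => q (k + 1)) := by
  rw [PySem.List.pyRange_one, PySem.List.pyRange_one, List.all_map, List.all_map,
    show (m - 1 - 0).toNat = (m - 1).toNat by omega]
  refine List.all_congr rfl ?_
  intro k
  show q (1 + (k : Int)) = q (0 + (k : Int) + 1)
  congr 1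
  omega

lemma check_alt_step (a : List Int) (l r : Int) (h : l < r) :
    check_alt a l r =
      ((PySem.List.pyGet? a l == PySem.List.pyGet? a r) &&
        check_alt a (l + 1) (r - 1)) := by
  have hm : 0 < PySem.Int.floordiv (r - l + 1) 2 := fd2_pos (by omega)
  have hfd : PySem.Int.floordiv (r - 1 - (l + 1) + 1) 2 = PySem.Int.floordiv (r - l + 1) 2 - 1 := by
    rw [show r - 1 - (l + 1) + 1 = r - l + 1 - 2 by ring, fd2_step]
  simp only [check_alt]
  rw [PySem.List.pyRange_one_cons hm]
  simp only [List.all_cons, add_zero, sub_zero, zero_add]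
  congr 1
  rw [all_pyRange_shift, hfd]
  refine List.all_congr rfl ?_
  intro k
  rw [show l + (k + 1) = l + 1 + k by ring, show r - (k + 1) = r - 1 - k by ring]

lemma check_eq_aux : ∀ (N : Nat) (a : List Int) (l r : Int), (r - l).toNat ≤ N →
    Pre_check a l r → check a l r = check_alt a l r := by
  intro N
  induction N with
  | zero =>
    intro a l r hN _
    have hge : r ≤ l := by omega
    rw [check_alt_of_ge a l r hge]
    unfold check
    simp [show l ≥ r from hge]
  | succ N ih =>
    intro a l r hN hpre
    by_cases hlr : l < r
    · obtain ⟨hl, hr⟩ := hpre hlr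
      rw [check_alt_step a l r hlr]
      unfold check
      simp only [show ¬ l ≥ r by omega, if_false]
      have hx : ∃ x, PySem.List.pyGet? a l = some x := by
        have : PySem.List.pyGet? a l ≠ none := by
          simp only [Ne, PySem.List.pyGet?_eq_none_iff, PySem.Raise.InRange, not_and, not_lt]
          omega
        exact Option.ne_none_iff_exists'.mp this
      have hy : ∃ y, PySem.List.pyGet? a r = some y := by
        have : PySem.List.pyGet? a r ≠ none := by
          simp only [Ne, PySem.List.pyGet?_eq_none_iff, PySem.Raise.InRange, not_and, not_lt]
          omega
        exact Option.ne_none_iff_exists'.mp this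
      obtain ⟨x, hx⟩ := hx
      obtain ⟨y, hy⟩ := hy
      rw [hx, hy]
      by_cases hxy : x = y
      · subst hxy
        simp only [bne_self_eq_false, beq_self_eq_true, Bool.true_and]
        apply ih a (l + 1) (r - 1) (by omega)
        intro h'
        constructor <;> [skip; omega]
        have : -(a.length : Int) ≤ l := hl
        omega
      · simp [bne_iff_ne, hxy]
    · have hge : r ≤ l := by omega
      rw [check_alt_of_ge a l r hge]
      unfold check
      simp [show l ≥ r from hge]

-- ===== VERDICT (by name: the statement is the Claim_ definition above) =====
theorem check_spec : Claim_equal_check := by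
  intro a l r _ hpre
  unfold Spec_check
  exact check_eq_aux (r - l).toNat a l r le_rfl hpre
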